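-- pv_equiv track=rewrite | github.com/bbl-dres/kennwerte-db | scripts/extract.py | parse_flat_filename
-- ===== SOURCE A (Python) =====
-- SOURCES = {
--     "bbl": "Bundesamt für Bauten und Logistik (BBL)",
--     "armasuisse": "armasuisse Immobilien (VBS)",
--     "stadt-zuerich": "Stadt Zürich, Hochbaudepartement",
-- }
--
-- CATEGORY_MAP = {
--     "ausland": ("AUSL", "BOTSCHAFT", "Bauten im Ausland"),
--     "bildung": ("FORSCH", "FORSCHUNG", "Bildung und Forschung"),
--     "bundeshaus": ("REPR", "REGIERUNG", "Bundeshaus"),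
--     "justiz": ("GERICHT", "GERICHT", "Justiz und Polizei"),
--     "kultur": ("KULT", "MUSEUM", "Kultur und Denkmäler"),
--     "parkanlagen": ("INFRA", "HIST", "Parkanlagen und Landwirtschaft"),
--     "produktion": ("INFRA", "WERKSTATT", "Produktion und Lager"),
--     "sport": ("SPORT", "SPORT", "Sport"),
--     "technik": ("INFRA", "VERW", "Technische Anlagen"),
--     "verschiedenes": ("ALLG", "VERW", "Verschiedenes"),
--     "verwaltung": ("ALLG", "VERW", "Verwaltung"),
--     "wohnen": ("ALLG", "WOHNEN", "Wohnen"),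
--     "zoll": ("ZOLL", "ZOLLANLAGE", "Zoll"),
--     "militaer": ("VBS", "KASERNE", "armasuisse / VBS"),
--     "hochbau": ("KOMMUN", "VERW", "Stadt Zürich"),
-- }
--
-- def parse_flat_filename(filename):
--     for src in sorted(SOURCES.keys(), key=len, reverse=True):
--         prefix = src + "_"
--         if filename.startswith(prefix):
--             rest = filename[len(prefix):]
--             for cat in sorted(CATEGORY_MAP.keys(), key=len, reverse=True):
--                 cat_prefix = cat + "_"
--                 if rest.startswith(cat_prefix):
--                     return src, cat, rest[len(cat_prefix):]
--     return None, None, filename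
-- ===== SOURCE B (Python) =====
-- SOURCES = {
--     "bbl": "Bundesamt für Bauten und Logistik (BBL)",
--     "armasuisse": "armasuisse Immobilien (VBS)",
--     "stadt-zuerich": "Stadt Zürich, Hochbaudepartement",
-- }
--
-- CATEGORY_MAP = {
--     "ausland": ("AUSL", "BOTSCHAFT", "Bauten im Ausland"),
--     "bildung": ("FORSCH", "FORSCHUNG", "Bildung und Forschung"),
--     "bundeshaus": ("REPR", "REGIERUNG", "Bundeshaus"),
--     "justiz": ("GERICHT", "GERICHT", "Justiz und Polizei"),
--     "kultur": ("KULT", "MUSEUM", "Kultur und Denkmäler"),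
--     "parkanlagen": ("INFRA", "HIST", "Parkanlagen und Landwirtschaft"),
--     "produktion": ("INFRA", "WERKSTATT", "Produktion und Lager"),
--     "sport": ("SPORT", "SPORT", "Sport"),
--     "technik": ("INFRA", "VERW", "Technische Anlagen"),
--     "verschiedenes": ("ALLG", "VERW", "Verschiedenes"),
--     "verwaltung": ("ALLG", "VERW", "Verwaltung"),
--     "wohnen": ("ALLG", "WOHNEN", "Wohnen"),
--     "zoll": ("ZOLL", "ZOLLANLAGE", "Zoll"),
--     "militaer": ("VBS", "KASERNE", "armasuisse / VBS"),
--     "hochbau": ("KOMMUN", "VERW", "Stadt Zürich"),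
-- }
--
-- def parse_flat_filename(filename):
--     # No source/category key contains '_', so prefix scanning is just
--     # tokenization at the first two underscores plus dict lookups.
--     first, sep, rest = filename.partition("_")
--     if sep and first in SOURCES:
--         cat, sep2, tail = rest.partition("_")
--         if sep2 and cat in CATEGORY_MAP:
--             return first, cat, tail
--     return None, None, filename
-- ===== Notes on version B (the rewrite author's own statement) =====
-- stated objective: simpler
-- what changed: Replaces the nested per-call length-sorted prefix-scan loops with two partition('_') tokenizations followed by direct dict-key membership tests, valid because no key contains an underscore.
import Mathlib
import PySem

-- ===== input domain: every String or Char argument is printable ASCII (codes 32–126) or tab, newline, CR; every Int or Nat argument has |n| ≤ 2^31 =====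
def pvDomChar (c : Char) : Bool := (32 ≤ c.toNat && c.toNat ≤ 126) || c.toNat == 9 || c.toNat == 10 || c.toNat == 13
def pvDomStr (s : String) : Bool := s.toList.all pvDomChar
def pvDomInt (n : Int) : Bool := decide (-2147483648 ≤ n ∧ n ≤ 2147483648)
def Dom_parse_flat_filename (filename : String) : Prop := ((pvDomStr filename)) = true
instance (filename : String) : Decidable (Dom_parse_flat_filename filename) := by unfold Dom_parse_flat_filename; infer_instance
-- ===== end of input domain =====

-- B replaces A's per-call length-sorted nested prefix-scan loops by two partition('_')
-- tokenizations plus direct key-membership tests (objective: simpler); no side effects.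

-- ===== PORT A =====
-- SOURCES.keys() / CATEGORY_MAP.keys(), in dict insertion order
def pvSrcKeys : List String := ["bbl", "armasuisse", "stadt-zuerich"]
def pvCatKeys : List String :=
  ["ausland", "bildung", "bundeshaus", "justiz", "kultur", "parkanlagen", "produktion",
   "sport", "technik", "verschiedenes", "verwaltung", "wohnen", "zoll", "militaer", "hochbau"]

-- inner 'for cat in sorted(...)' loop: returns the tuple on the first matching category prefix
def pvACatLoop (src rest : String) : List String → Option (Option String × Option String × String)
  | [] => none
  | cat :: more =>
      if PySem.Str.startswith rest (cat ++ "_") then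
        some (some src, some cat,
              PySem.Str.slice rest (some ((PySem.Str.len (cat ++ "_") : Int))) none)
      else pvACatLoop src rest more

-- outer 'for src in sorted(...)' loop; a source whose inner loop finds no category falls through
def pvASrcLoop (filename : String) : List String → Option (Option String × Option String × String)
  | [] => none
  | src :: more =>
      if PySem.Str.startswith filename (src ++ "_") then
        match pvACatLoop src
            (PySem.Str.slice filename (some ((PySem.Str.len (src ++ "_") : Int))) none)
            (PySem.List.sorted pvCatKeys (fun c => PySem.Str.len c) true) with
        | some r => some r
        | none => pvASrcLoop filename more
      else pvASrcLoop filename more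

def parse_flat_filename (filename : String) : Option String × Option String × String :=
  match pvASrcLoop filename (PySem.List.sorted pvSrcKeys (fun s => PySem.Str.len s) true) with
  | some r => r
  | none => (none, none, filename)

-- ===== PORT B =====
-- hand-port of str.partition("_") (PySem has no partition); exact for the single-char
-- separator '_': split at the first '_', sep flag false when there is none
def pvPartitionU (s : String) : String × Bool × String :=
  let pre := s.toList.takeWhile (fun c => c != '_')
  match s.toList.dropWhile (fun c => c != '_') with
  | [] => (String.ofList pre, false, "")
  | _ :: t => (String.ofList pre, true, String.ofList t)

def parse_flat_filename_alt (filename : String) : Option String × Option String × String :=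
  let p := pvPartitionU filename
  if p.2.1 && pvSrcKeys.contains p.1 then
    let q := pvPartitionU p.2.2
    if q.2.1 && pvCatKeys.contains q.1 then (some p.1, some q.1, q.2.2)
    else (none, none, filename)
  else (none, none, filename)

-- ===== PRECONDITION & SPEC =====
def Spec_parse_flat_filename (filename : String) (out : Option String × Option String × String) : Prop := out = parse_flat_filename_alt filename
instance (filename : String) (out : Option String × Option String × String) : Decidable (Spec_parse_flat_filename filename out) := by unfold Spec_parse_flat_filename; infer_instance

-- ===== CLAIM (what is proved, stated in full; the proofs are below) =====
def Claim_equal_parse_flat_filename : Prop := ∀ (filename : String), Dom_parse_flat_filename filename → Spec_parse_flat_filename filename (parse_flat_filename filename)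

-- ===== LEMMAS AND PROOFS =====

-- splitting a list at an explicit first '_' (k underscore-free)
theorem pv_tw_dw (k t : List Char) (hk : '_' ∉ k) :
    (k ++ '_' :: t).takeWhile (fun c => c != '_') = k ∧
    (k ++ '_' :: t).dropWhile (fun c => c != '_') = '_' :: t := by
  induction k with
  | nil => simp
  | cons c cs ih =>
      simp only [List.mem_cons, not_or] at hk
      have := ih hk.2
      simp [bne_iff_ne, Ne.symm hk.1, this.1, this.2]

-- 'startswith(k + "_")' read through the partition of cs at its first '_'
theorem pv_startswith_iff (k cs : List Char) (hk : '_' ∉ k) :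
    (k ++ ['_'] <+: cs) ↔
      cs.takeWhile (fun c => c != '_') = k ∧ cs.dropWhile (fun c => c != '_') ≠ [] := by
  constructor
  · rintro ⟨t, ht⟩
    have hcs : cs = k ++ '_' :: t := by simpa using ht.symm
    subst hcs
    have h := pv_tw_dw k t hk
    simp [h.1, h.2]
  · rintro ⟨ht, hd⟩
    rcases hdw : cs.dropWhile (fun c => c != '_') with _ | ⟨c, t⟩
    · exact absurd hdw hd
    · have hc : ¬ (c != '_') = true := by
        have := List.head_dropWhile_not (l := cs) (p := fun c => c != '_')
        simp only [hdw] at this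
        simpa using this (by simp)
      have hc' : c = '_' := by simpa using hc
      subst hc'
      refine ⟨t, ?_⟩
      have hsplit := List.takeWhile_append_dropWhile (p := fun c => c != '_') (l := cs)
      rw [ht, hdw] at hsplit
      simpa using hsplit

theorem pv_startswith_eq (rest cat : String) :
    PySem.Str.startswith rest (cat ++ "_") = true ↔ cat.toList ++ ['_'] <+: rest.toList := by
  rw [PySem.Str.startswith_eq, PySem.Chars.startswith_iff, String.toList_append]
  simp

-- the trailing slice: rest[len(k + "_"):] is the tail after the matched prefix
theorem pv_slice_eq (s k : String) (t : List Char) (h : s.toList = k.toList ++ '_' :: t) :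
    PySem.Str.slice s (some ((PySem.Str.len (k ++ "_") : Int))) none = String.ofList t := by
  have h1 : (PySem.Str.slice s (some ((PySem.Str.len (k ++ "_") : Int))) none).toList
      = (String.ofList t).toList := by
    rw [PySem.Str.toList_slice]
    simp only [PySem.Chars.slice_eq_listSlice, PySem.Str.len_eq]
    rw [PySem.List.slice_from_natCast]
    rw [h, String.toList_append, String.toList_ofList]
    have hassoc : k.toList ++ '_' :: t = (k.toList ++ ['_']) ++ t := by simp
    rw [hassoc, List.drop_left, String.toList_ofList]
  have h2 := congrArg String.ofList h1
  simpa [String.ofList_toList] using h2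

-- membership of a char-list token among the keys
theorem pv_ofList_mem (l : List Char) (keys : List String) :
    (String.ofList l ∈ keys) ↔ l ∈ keys.map String.toList := by
  simp only [List.mem_map]
  constructor
  · intro h; exact ⟨String.ofList l, h, by simp⟩
  · rintro ⟨s, hs, rfl⟩
    simpa [String.ofList_toList] using hs

-- the inner category loop, order-independently: it fires iff the partition head is a key
theorem pv_catLoop_eq (src rest : String) (keys : List String)
    (hk : ∀ k ∈ keys, '_' ∉ k.toList) :
    pvACatLoop src rest keys =
      (if rest.toList.dropWhile (fun c => c != '_') ≠ [] ∧
          rest.toList.takeWhile (fun c => c != '_') ∈ keys.map String.toList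
       then some (some src, some (String.ofList (rest.toList.takeWhile (fun c => c != '_'))),
                  String.ofList ((rest.toList.dropWhile (fun c => c != '_')).tail))
       else none) := by
  induction keys with
  | nil => simp [pvACatLoop]
  | cons cat more ih =>
      have hkc : '_' ∉ cat.toList := hk cat (by simp)
      have ih' := ih (fun k hkm => hk k (List.mem_cons_of_mem _ hkm))
      rw [pvACatLoop]
      by_cases hm : rest.toList.takeWhile (fun c => c != '_') = cat.toList ∧
          rest.toList.dropWhile (fun c => c != '_') ≠ []
      · have hpre : cat.toList ++ ['_'] <+: rest.toList :=
          (pv_startswith_iff cat.toList rest.toList hkc).mpr hm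
        rw [if_pos ((pv_startswith_eq rest cat).mpr hpre)]
        obtain ⟨u, hu⟩ := hpre
        have hrl : rest.toList = cat.toList ++ '_' :: u := by simpa using hu.symm
        have htd := pv_tw_dw cat.toList u hkc
        rw [if_pos ?side]
        case side =>
          exact ⟨hm.2, by rw [hm.1]; exact List.mem_map_of_mem (by simp)⟩
        have hsl := pv_slice_eq rest cat u hrl
        rw [hsl, hm.1, String.ofList_toList, hrl, htd.2]
        rfl
      · rw [if_neg ?noswc]
        case noswc =>
          intro hsw
          exact hm ((pv_startswith_iff cat.toList rest.toList hkc).mp ((pv_startswith_eq rest cat).mp hsw))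
        rw [ih']
        by_cases hd : rest.toList.dropWhile (fun c => c != '_') = []
        · simp [hd]
        · have hne : rest.toList.takeWhile (fun c => c != '_') ≠ cat.toList := by
            intro h; exact hm ⟨h, hd⟩
          simp only [List.map_cons, List.mem_cons]
          by_cases hmem : rest.toList.takeWhile (fun c => c != '_') ∈ more.map String.toList
          · rw [if_pos ⟨hd, hmem⟩, if_pos ⟨hd, Or.inr hmem⟩]
          · rw [if_neg (fun h => hmem h.2), if_neg (fun h => h.2.elim hne hmem)]

-- the outer source loop: at most one source key can match; order and fall-through vanish
set_option maxHeartbeats 1600000 in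
theorem pv_srcLoop_eq (filename : String) (keys : List String)
    (hk : ∀ k ∈ keys, '_' ∉ k.toList) (hnd : (keys.map String.toList).Nodup) :
    pvASrcLoop filename keys =
      (if filename.toList.dropWhile (fun c => c != '_') ≠ [] ∧
          filename.toList.takeWhile (fun c => c != '_') ∈ keys.map String.toList
       then pvACatLoop (String.ofList (filename.toList.takeWhile (fun c => c != '_')))
              (String.ofList ((filename.toList.dropWhile (fun c => c != '_')).tail))
              (PySem.List.sorted pvCatKeys (fun c => PySem.Str.len c) true)
       else none) := by
  induction keys with
  | nil => simp [pvASrcLoop]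
  | cons src more ih =>
      have hks : '_' ∉ src.toList := hk src (by simp)
      simp only [List.map_cons, List.nodup_cons] at hnd
      have ih' := ih (fun k hkm => hk k (List.mem_cons_of_mem _ hkm)) hnd.2
      rw [pvASrcLoop]
      by_cases hm : filename.toList.takeWhile (fun c => c != '_') = src.toList ∧
          filename.toList.dropWhile (fun c => c != '_') ≠ []
      · have hpre : src.toList ++ ['_'] <+: filename.toList :=
          (pv_startswith_iff src.toList filename.toList hks).mpr hm
        rw [if_pos ((pv_startswith_eq filename src).mpr hpre)]
        obtain ⟨u, hu⟩ := hpre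
        have hrl : filename.toList = src.toList ++ '_' :: u := by simpa using hu.symm
        have htd := pv_tw_dw src.toList u hks
        -- the remaining sources cannot match: their token would equal two distinct keys
        have hrest : pvASrcLoop filename more = none := by
          rw [ih', if_neg]
          rintro ⟨-, hmem⟩
          rw [hm.1] at hmem
          exact hnd.1 hmem
        rw [hrest]
        have hsrc : String.ofList (filename.toList.takeWhile (fun c => c != '_')) = src := by
          rw [hm.1, String.ofList_toList]
        have hrest2 : PySem.Str.slice filename (some ((PySem.Str.len (src ++ "_") : Int))) none
            = String.ofList ((filename.toList.dropWhile (fun c => c != '_')).tail) := by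
          rw [pv_slice_eq filename src u hrl, hrl, htd.2]
          rfl
        rw [if_pos ⟨hm.2, by rw [hm.1]; exact List.mem_map_of_mem (by simp)⟩, hsrc, ← hrest2]
        generalize PySem.List.sorted pvCatKeys (fun c => PySem.Str.len c) true = L
        cases pvACatLoop src
            (PySem.Str.slice filename (some ((PySem.Str.len (src ++ "_") : Int))) none) L <;> rfl
      · rw [if_neg ?noswc]
        case noswc =>
          intro hsw
          exact hm ((pv_startswith_iff src.toList filename.toList hks).mp ((pv_startswith_eq filename src).mp hsw))
        rw [ih']
        by_cases hd : filename.toList.dropWhile (fun c => c != '_') = []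
        · simp [hd]
        · have hne : filename.toList.takeWhile (fun c => c != '_') ≠ src.toList := by
            intro h; exact hm ⟨h, hd⟩
          simp only [List.map_cons, List.mem_cons]
          by_cases hmem : filename.toList.takeWhile (fun c => c != '_') ∈ more.map String.toList
          · rw [if_pos ⟨hd, hmem⟩, if_pos ⟨hd, Or.inr hmem⟩]
          · rw [if_neg (fun h => hmem h.2), if_neg (fun h => h.2.elim hne hmem)]

-- sorting the key lists only permutes them: the hypotheses of the loop lemmas transfer
theorem pv_sorted_src_mem (l : List Char) :
    (l ∈ (PySem.List.sorted pvSrcKeys (fun s => PySem.Str.len s) true).map String.toList) ↔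
      l ∈ pvSrcKeys.map String.toList := by
  exact ((PySem.List.sorted_perm pvSrcKeys (fun s => PySem.Str.len s) true).map String.toList).mem_iff

theorem pv_sorted_cat_mem (l : List Char) :
    (l ∈ (PySem.List.sorted pvCatKeys (fun c => PySem.Str.len c) true).map String.toList) ↔
      l ∈ pvCatKeys.map String.toList := by
  exact ((PySem.List.sorted_perm pvCatKeys (fun c => PySem.Str.len c) true).map String.toList).mem_iff

-- ===== VERDICT (by name: the statement is the Claim_ definition above) =====
set_option maxHeartbeats 1600000 in
theorem parse_flat_filename_spec : Claim_equal_parse_flat_filename := by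
  intro filename _
  show parse_flat_filename filename = parse_flat_filename_alt filename
  have hkS : ∀ k ∈ PySem.List.sorted pvSrcKeys (fun s => PySem.Str.len s) true, '_' ∉ k.toList := by
    intro k hkm
    have : k ∈ pvSrcKeys := (PySem.List.mem_sorted _ _ _ _).mp hkm
    revert this
    have : ∀ k ∈ pvSrcKeys, '_' ∉ k.toList := by decide
    exact this k
  have hkC : ∀ k ∈ PySem.List.sorted pvCatKeys (fun c => PySem.Str.len c) true, '_' ∉ k.toList := by
    intro k hkm
    have : k ∈ pvCatKeys := (PySem.List.mem_sorted _ _ _ _).mp hkm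
    revert this
    have : ∀ k ∈ pvCatKeys, '_' ∉ k.toList := by decide
    exact this k
  have hndS : ((PySem.List.sorted pvSrcKeys (fun s => PySem.Str.len s) true).map String.toList).Nodup := by
    refine (((PySem.List.sorted_perm pvSrcKeys (fun s => PySem.Str.len s) true).map String.toList).nodup_iff).mpr ?_
    decide
  rw [parse_flat_filename, pv_srcLoop_eq filename _ hkS hndS]
  rw [pv_catLoop_eq _ _ _ hkC]
  rw [parse_flat_filename_alt]
  simp only [pvPartitionU, pv_sorted_src_mem, pv_sorted_cat_mem]
  rcases h1 : filename.toList.dropWhile (fun c => c != '_') with _ | ⟨c1, t1⟩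
  · simp [h1]
  · simp only [h1, String.toList_ofList]
    by_cases hmemS : filename.toList.takeWhile (fun c => c != '_') ∈ pvSrcKeys.map String.toList
    · rw [if_pos ⟨by simp, hmemS⟩]
      have hmemS' : String.ofList (filename.toList.takeWhile (fun c => c != '_')) ∈ pvSrcKeys :=
        (pv_ofList_mem _ _).mpr hmemS
      rcases h2 : t1.dropWhile (fun c => c != '_') with _ | ⟨c2, t2⟩
      · simp [h2, hmemS']
      · simp only [String.toList_ofList, h2]
        by_cases hmemC : t1.takeWhile (fun c => c != '_') ∈ pvCatKeys.map String.toList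
        · have hmemC' : String.ofList (t1.takeWhile (fun c => c != '_')) ∈ pvCatKeys :=
            (pv_ofList_mem _ _).mpr hmemC
          rw [if_pos ⟨by simp [h2], hmemC⟩]
          simp [hmemS', hmemC', h2]
        · have hmemC' : String.ofList (t1.takeWhile (fun c => c != '_')) ∉ pvCatKeys := by
            intro h; exact hmemC ((pv_ofList_mem _ _).mp h)
          rw [if_neg (fun h => hmemC h.2)]
          simp [hmemS', hmemC']
    · rw [if_neg (fun h => hmemS h.2)]
      have hmemS' : String.ofList (filename.toList.takeWhile (fun c => c != '_')) ∉ pvSrcKeys := by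
        intro h; exact hmemS ((pv_ofList_mem _ _).mp h)
      simp [hmemS']
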